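-- pv_equiv track=rewrite | github.com/JustWannaFly/PyAOC | 22/src/day5.py | split_crates_and_moves
-- ===== SOURCE A (Python) =====
-- def split_crates_and_moves(input):
--     crate_data = []
--     move_data = []
--     crates_complete = False
--     for line in input:
--         if not crates_complete:
--             if line == '\n':
--                 crates_complete = True
--             else:
--                 crate_data.append(line)
--         else:
--             move_data.append(line)
--     return (crate_data, move_data)
-- ===== SOURCE B (Python) =====
-- def split_crates_and_moves(input):
--     lines = list(input)
--     try:
--         i = lines.index('\n')
--     except ValueError:
--         return (lines, [])
--     return (lines[:i], lines[i+1:])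
-- ===== Notes on version B (the rewrite author's own statement) =====
-- stated objective: simpler
-- what changed: Replaces the line-by-line loop with a boolean flag and two growing accumulators by locating the first blank line with list.index and partitioning with two slices.
import Mathlib
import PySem

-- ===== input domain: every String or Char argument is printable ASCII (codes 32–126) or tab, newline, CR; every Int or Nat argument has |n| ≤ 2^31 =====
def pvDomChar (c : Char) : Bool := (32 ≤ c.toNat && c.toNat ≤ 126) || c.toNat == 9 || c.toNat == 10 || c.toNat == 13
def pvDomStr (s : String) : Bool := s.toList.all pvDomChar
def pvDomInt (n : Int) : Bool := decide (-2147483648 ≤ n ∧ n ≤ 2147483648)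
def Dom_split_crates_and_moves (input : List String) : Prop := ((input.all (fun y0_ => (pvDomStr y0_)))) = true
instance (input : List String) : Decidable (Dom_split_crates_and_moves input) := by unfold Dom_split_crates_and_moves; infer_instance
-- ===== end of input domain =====

-- ===== PORT A =====
-- B finds the first blank line's index and slices; simpler than A's flagged accumulator loop.
def split_crates_and_moves (input : List String) : List String × List String :=
  let st := input.foldl
    (fun (s : List String × List String × Bool) line =>
      if !s.2.2 then
        if line = "\n" then (s.1, s.2.1, true)
        else (s.1 ++ [line], s.2.1, s.2.2)
      else (s.1, s.2.1 ++ [line], s.2.2))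
    ([], [], false)
  (st.1, st.2.1)

-- ===== PORT B =====
def split_crates_and_moves_alt (input : List String) : List String × List String :=
  match PySem.List.index? input "\n" with
  | none => (input, [])
  | some i => (input.take i, input.drop (i + 1))

-- ===== PRECONDITION & SPEC =====
def Spec_split_crates_and_moves (input : List String) (out : List String × List String) : Prop := out = split_crates_and_moves_alt input
instance (input : List String) (out : List String × List String) : Decidable (Spec_split_crates_and_moves input out) := by unfold Spec_split_crates_and_moves; infer_instance

-- ===== CLAIM (what is proved, stated in full; the proofs are below) =====
def Claim_equal_split_crates_and_moves : Prop := ∀ (input : List String), Dom_split_crates_and_moves input → Spec_split_crates_and_moves input (split_crates_and_moves input)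

-- ===== LEMMAS AND PROOFS =====

def pvStep (s : List String × List String × Bool) (line : String) : List String × List String × Bool :=
  if !s.2.2 then
    if line = "\n" then (s.1, s.2.1, true)
    else (s.1 ++ [line], s.2.1, s.2.2)
  else (s.1, s.2.1 ++ [line], s.2.2)

theorem pv_foldl_true (input : List String) (cd md : List String) :
    input.foldl pvStep (cd, md, true) = (cd, md ++ input, true) := by
  induction input generalizing md with
  | nil => simp
  | cons x xs ih => simp [pvStep, ih]

theorem pv_foldl_false (input : List String) (cd md : List String) :
    input.foldl pvStep (cd, md, false) =
      match PySem.List.index? input "\n" with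
      | none => (cd ++ input, md, false)
      | some i => (cd ++ input.take i, md ++ input.drop (i + 1), true) := by
  induction input generalizing cd with
  | nil => simp
  | cons x xs ih =>
    by_cases hx : x = "\n"
    · subst hx
      rw [PySem.List.index?_cons_self]
      simp [pvStep, pv_foldl_true]
    · rw [PySem.List.index?_cons_of_ne xs hx]
      simp only [List.foldl_cons, pvStep, hx, if_false, Bool.not_false, if_true]
      rw [ih (cd ++ [x])]
      cases h : PySem.List.index? xs "\n" with
      | none => simp
      | some i => simp

-- ===== VERDICT (by name: the statement is the Claim_ definition above) =====
theorem split_crates_and_moves_spec : Claim_equal_split_crates_and_moves := by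
  intro input _
  show split_crates_and_moves input = split_crates_and_moves_alt input
  unfold split_crates_and_moves split_crates_and_moves_alt
  have : (fun (s : List String × List String × Bool) line =>
      if !s.2.2 then
        if line = "\n" then (s.1, s.2.1, true)
        else (s.1 ++ [line], s.2.1, s.2.2)
      else (s.1, s.2.1 ++ [line], s.2.2)) = pvStep := rfl
  rw [this, pv_foldl_false input [] []]
  cases h : PySem.List.index? input "\n" <;> simp
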